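-- pv_equiv track=rewrite | github.com/thaReal/MasterChef | codeforces/round_651/compression.py | solve
-- ===== SOURCE A (Python) =====
-- def solve(n, a):
-- 	l = n - 1
-- 	mod2 = [x % 2 for x in a]
-- 	selected = [0 for _ in range(2*n)]
-- 	pairs = []
--
-- 	for i in range(2*n):
-- 		if selected[i] == 1:
-- 			continue
--
-- 		ai = a[i]
-- 		parity = mod2[i]
-- 		for j in range(len(a[i+1:])):
-- 			if selected[i+j+1] == 0:
-- 				if mod2[i+j+1] == parity:
-- 					# Match Found
-- 					pairs.append([i, i+j+1])
-- 					selected[i] = 1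
-- 					selected[i+j+1] = 1
-- 					break
--
-- 		if len(pairs) == l:
-- 			break
--
--
-- 	return pairs
-- ===== SOURCE B (Python) =====
-- def _pair_up(idxs):
--     # pair consecutive indices of one parity class
--     out = []
--     k = 0
--     while k + 1 < len(idxs):
--         out.append([idxs[k], idxs[k + 1]])
--         k += 2
--     return out
--
--
-- def solve(n, a):
--     evens = [i for i, x in enumerate(a) if x % 2 == 0]
--     odds = [i for i, x in enumerate(a) if x % 2 == 1]
--     ep = _pair_up(evens)
--     op = _pair_up(odds)
--     merged = []
--     ei = 0
--     oi = 0
--     while ei < len(ep) and oi < len(op):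
--         if ep[ei][0] < op[oi][0]:
--             merged.append(ep[ei])
--             ei += 1
--         else:
--             merged.append(op[oi])
--             oi += 1
--     merged += ep[ei:] + op[oi:]
--     return merged[:max(n - 1, 0)]
-- ===== Notes on version B (the rewrite author's own statement) =====
-- stated objective: faster
-- what changed: Replaces A's quadratic greedy (for each index, rescan the whole suffix for an unselected same-parity partner) by one pass that splits indices into even/odd parity classes, pairs each class consecutively, merges the two pair lists by left index and takes the first n-1 pairs.
-- intended difference: For n=1 with a[0] and a[1] of equal parity A returns the one pair [[0,1]] even though only n-1=0 pairs are requested, because its break check 'len(pairs)==l' is skipped when the pair is formed in the same iteration; B returns [], the intended n-1 pairs. — e.g. on solve(1, [2, 4]): A returns [[0, 1]], B returns []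
-- outside the precondition, e.g. on solve(3, [1, 1, 1, 1, 1, 1, 1, 1]): A returns [[0, 1], [2, 3]], B returns [[0, 1], [2, 3]]
import Mathlib
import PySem

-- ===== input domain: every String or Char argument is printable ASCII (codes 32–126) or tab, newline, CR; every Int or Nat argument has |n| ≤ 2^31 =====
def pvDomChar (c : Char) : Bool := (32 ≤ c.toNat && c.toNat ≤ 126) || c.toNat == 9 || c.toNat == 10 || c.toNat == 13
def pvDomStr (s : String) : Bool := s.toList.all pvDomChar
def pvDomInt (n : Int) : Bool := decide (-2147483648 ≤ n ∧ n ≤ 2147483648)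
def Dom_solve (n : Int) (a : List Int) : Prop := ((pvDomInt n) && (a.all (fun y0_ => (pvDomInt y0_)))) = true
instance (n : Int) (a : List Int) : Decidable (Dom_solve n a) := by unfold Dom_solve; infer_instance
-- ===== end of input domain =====

-- B replaces A's O(n^2) greedy suffix-rescan by an O(n) parity-class split,
-- consecutive pairing per class, and a merge by left index truncated to n-1 pairs.

-- ===== PORT A =====

-- inner loop: 'for j in range(len(a[i+1:])): if selected[i+j+1]==0: if mod2[i+j+1]==parity: … break'
-- scanned position k = i+j+1; cnt = remaining j iterations; indices are nonneg Nats, so .getD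
-- matches Python indexing on the precondition (len(a) = 2n), where all accesses are in range.
def findJA (mod2 sel : List Int) (parity : Int) : Nat → Nat → Option Nat
  | 0, _ => none
  | cnt + 1, k =>
    if sel.getD k 0 == 0 && mod2.getD k 0 == parity then some k
    else findJA mod2 sel parity cnt (k + 1)

-- outer loop: 'for i in range(2*n)' with break when len(pairs) == l; rem = remaining iterations.
-- ('ai = a[i]' in A is dead code and is not re-read here; on Pre_ it cannot raise.)
def aLoop (mod2 : List Int) (l : Int) : Nat → Nat → List Int → List (List Int) → List (List Int)
  | 0, _, _, pairs => pairs
  | rem + 1, i, sel, pairs =>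
    if sel.getD i 0 == 1 then aLoop mod2 l rem (i + 1) sel pairs
    else
      -- parity = mod2[i]; on a match (i, k): pairs.append([i, k]); selected[i] = selected[k] = 1
      match findJA mod2 sel (mod2.getD i 0) (mod2.length - (i + 1)) (i + 1) with
      | some k =>
        if ((pairs ++ [[(i : Int), (k : Int)]]).length : Int) == l
        then pairs ++ [[(i : Int), (k : Int)]]
        else aLoop mod2 l rem (i + 1) ((sel.set i 1).set k 1) (pairs ++ [[(i : Int), (k : Int)]])
      | none =>
        if (pairs.length : Int) == l then pairs else aLoop mod2 l rem (i + 1) sel pairs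

def solve (n : Int) (a : List Int) : List (List Int) :=
  let l := n - 1
  let mod2 := a.map (fun x => PySem.Int.mod x 2)
  let selected := List.replicate (2 * n).toNat (0 : Int)
  aLoop mod2 l (2 * n).toNat 0 selected []

-- ===== PORT B =====

-- '_pair_up': while k+1 < len(idxs): append [idxs[k], idxs[k+1]]; k += 2
def pairUpB : List Int → List (List Int)
  | x :: y :: r => [x, y] :: pairUpB r
  | _ => []

-- merge loop of Source B: while both nonempty take the pair with the smaller left index, then append the rests
def mergeB : List (List Int) → List (List Int) → List (List Int)
  | [], op => op
  | ep, [] => ep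
  | e :: et, o :: ot =>
    if e.getD 0 0 < o.getD 0 0 then e :: mergeB et (o :: ot) else o :: mergeB (e :: et) ot
  termination_by ep op => ep.length + op.length

def solve_alt (n : Int) (a : List Int) : List (List Int) :=
  let evens := ((PySem.List.enumerate a).filter (fun p => PySem.Int.mod p.2 2 == 0)).map (fun p => p.1)
  let odds := ((PySem.List.enumerate a).filter (fun p => PySem.Int.mod p.2 2 == 1)).map (fun p => p.1)
  let ep := pairUpB evens
  let op := pairUpB odds
  (mergeB ep op).take (n - 1).toNat     -- merged[:max(n-1, 0)]

-- ===== PRECONDITION & SPEC =====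

-- Pre_: the inputs on which A is guaranteed to return: n ≤ 0 (the loop runs zero times),
-- len(a) = 2*n (the shape A is written for), a shorter list that still holds exactly the
-- n-1 requested pairs (A breaks before reading past the end), n = 1 with a[0], a[1] of
-- equal parity (A pairs them at once and stops), or n = 2 on a longer list whose first
-- element finds a same-parity partner within the scanned window (one pair, then break).  On other shapes A raises IndexError on
-- most inputs (a[i] or selected[i+j+1] out of range) and returns only when a break of its
-- scan happens first, an accident of the scan order.
def Pre_solve (n : Int) (a : List Int) : Prop :=
  n ≤ 0 ∨ (a.length : Int) = 2 * n ∨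
  (1 ≤ n ∧ 1 ≤ a.length ∧ (a.length : Int) < 2 * n ∧
    ((a.countP (fun v => PySem.Int.mod v 2 == 0) / 2
      + a.countP (fun v => PySem.Int.mod v 2 == 1) / 2 : Nat) : Int) = n - 1) ∨
  (n = 1 ∧ 2 ≤ a.length ∧ PySem.Int.mod (a.getD 0 0 + a.getD 1 0) 2 = 0) ∨
  (n = 2 ∧ 4 < (a.length : Int) ∧
    (PySem.Int.mod (a.getD 0 0 + a.getD 1 0) 2 = 0 ∨
     PySem.Int.mod (a.getD 0 0 + a.getD 2 0) 2 = 0 ∨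
     PySem.Int.mod (a.getD 0 0 + a.getD 3 0) 2 = 0))
instance (n : Int) (a : List Int) : Decidable (Pre_solve n a) := by unfold Pre_solve; infer_instance

def pvWitness_solve : Int × List Int := (2, [1, 3, 2, 4])

-- For n=1 with a[0] and a[1] of equal parity A returns the one pair [[0,1]] even though only
-- n-1=0 pairs are requested (its break check is skipped in the iteration that forms the pair);
-- B returns [], the intended n-1 pairs.
def D_solve (n : Int) (a : List Int) : Prop :=
  n = 1 ∧ 2 ≤ a.length ∧ PySem.Int.mod (a.getD 0 0 + a.getD 1 0) 2 = 0
instance (n : Int) (a : List Int) : Decidable (D_solve n a) := by unfold D_solve; infer_instance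

def Spec_solve (n : Int) (a : List Int) (out : List (List Int)) : Prop :=
  ¬ D_solve n a → out = solve_alt n a
instance (n : Int) (a : List Int) (out : List (List Int)) : Decidable (Spec_solve n a out) := by
  unfold Spec_solve; infer_instance

def pvDiffWitness_solve : Int × List Int := (1, [2, 4])
def pvDiffWitnessOut_solve : (List (List Int)) × (List (List Int)) := ([[0, 1]], [])

-- ===== CLAIM (what is proved, stated in full; the proofs are below) =====
def Claim_unchanged_solve : Prop :=
  ∀ (n : Int) (a : List Int), Dom_solve n a → Pre_solve n a → Spec_solve n a (solve n a)
def Claim_changed_solve : Prop :=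
  Dom_solve (pvDiffWitness_solve.1) (pvDiffWitness_solve.2) ∧
  Pre_solve (pvDiffWitness_solve.1) (pvDiffWitness_solve.2) ∧
  D_solve (pvDiffWitness_solve.1) (pvDiffWitness_solve.2) ∧
  solve (pvDiffWitness_solve.1) (pvDiffWitness_solve.2) = pvDiffWitnessOut_solve.1 ∧
  solve_alt (pvDiffWitness_solve.1) (pvDiffWitness_solve.2) = pvDiffWitnessOut_solve.2 ∧
  pvDiffWitnessOut_solve.1 ≠ pvDiffWitnessOut_solve.2
def Claim_exact_solve : Prop :=
  ∀ (n : Int) (a : List Int), Dom_solve n a → Pre_solve n a → D_solve n a →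
    solve n a ≠ solve_alt n a

-- ===== LEMMAS AND PROOFS =====

-- proof-side reference: unselected indices ≥ k (sel is the 0/1 bitmap, m = mod2 list length)
def unself (M sel : List Int) (k : Nat) : List Nat :=
  (List.range' k (M.length - k)).filter (fun x => sel.getD x 0 == 0)

-- reference greedy on the unselected list: pair the head with the first same-parity element after it
def RG (M : List Int) : List Nat → List (List Int)
  | [] => []
  | u :: rest =>
    match h : (rest.filter (fun x => M.getD x 0 == M.getD u 0)).head? with
    | none => RG M rest
    | some v => [(u : Int), (v : Int)] :: RG M (rest.erase v)
  termination_by U => U.length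
  decreasing_by
    · simp
    · have : (rest.erase v).length ≤ rest.length := List.length_erase_le
      simp; omega

-- Nat-side mirrors of B's helpers
def pairUpN : List Nat → List (List Int)
  | x :: y :: r => [(x : Int), (y : Int)] :: pairUpN r
  | _ => []

-- getD after set, stated the way the proofs use it
theorem getD_set_eq {sel : List Int} {j x : Nat} {v : Int}
    (h : j < sel.length) :
    (sel.set j v).getD x 0 = if x = j then v else sel.getD x 0 := by
  rw [List.getD_eq_getElem?_getD, List.getD_eq_getElem?_getD, List.getElem?_set]
  split_ifs with h1 h2
  · subst h1; simp [h]
  · simp_all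
  · simp_all
  · rfl

theorem unself_cons (M sel : List Int) {k : Nat} (hk : k < M.length)
    (h : sel.getD k 0 = 0) : unself M sel k = k :: unself M sel (k + 1) := by
  unfold unself
  have hc : M.length - k = (M.length - (k + 1)) + 1 := by omega
  rw [hc, List.range'_succ, List.filter_cons_of_pos (by simp only [beq_iff_eq]; exact h)]

theorem unself_succ (M sel : List Int) {k : Nat} (h : sel.getD k 0 ≠ 0) :
    unself M sel k = unself M sel (k + 1) := by
  unfold unself
  rcases Nat.lt_or_ge k M.length with hk | hk
  · have hc : M.length - k = (M.length - (k + 1)) + 1 := by omega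
    rw [hc, List.range'_succ, List.filter_cons_of_neg (by simp only [beq_iff_eq]; exact h)]
  · have h1 : M.length - k = 0 := by omega
    have h2 : M.length - (k + 1) = 0 := by omega
    rw [h1, h2]
    simp

-- the inner scan finds exactly the first unselected same-parity index ≥ k
theorem findJA_eq_head (M sel : List Int) (p : Int) :
    ∀ (cnt k : Nat), k + cnt = M.length →
      findJA M sel p cnt k = ((unself M sel k).filter (fun x => M.getD x 0 == p)).head? := by
  intro cnt
  induction cnt with
  | zero =>
    intro k hk
    have h0 : M.length - k = 0 := by omega
    simp [findJA, unself, h0]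
  | succ c ih =>
    intro k hk
    have hstep : findJA M sel p (c + 1) k
        = if sel.getD k 0 == 0 && M.getD k 0 == p then some k
          else findJA M sel p c (k + 1) := rfl
    rw [hstep]
    by_cases hs : sel.getD k 0 = 0
    · by_cases hp : M.getD k 0 = p
      · rw [if_pos (by rw [hs, hp]; simp)]
        rw [unself_cons M sel (by omega) hs,
            List.filter_cons_of_pos (by simp only [beq_iff_eq]; exact hp),
            List.head?_cons]
      · rw [if_neg (by rw [hs]; simp only [beq_self_eq_true, Bool.true_and, beq_iff_eq]; exact hp)]
        rw [unself_cons M sel (by omega) hs,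
            List.filter_cons_of_neg (by simp only [beq_iff_eq]; exact hp)]
        exact ih (k + 1) (by omega)
    · rw [if_neg (by simp only [Bool.and_eq_true, beq_iff_eq]; tauto)]
      rw [unself_succ M sel hs]
      exact ih (k + 1) (by omega)

theorem filter_erase_head {l t : List Nat} {g : Nat → Bool} {v : Nat}
    (h : l.filter g = v :: t) : (l.erase v).filter g = t := by
  induction l generalizing t with
  | nil => simp at h
  | cons x r ih =>
    by_cases hx : g x
    · simp [hx] at h
      obtain ⟨h1, h2⟩ := h
      subst h1; simp [List.erase_cons_head, h2]
    · simp [hx] at h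
      have hvx : x ≠ v := by
        intro e
        have hm : v ∈ List.filter g r := h ▸ List.mem_cons_self
        have := List.of_mem_filter hm
        rw [← e] at this; simp_all
      rw [List.erase_cons_tail (by simp [hvx])]
      simp [hx, ih h]

theorem filter_erase_not {l : List Nat} {g : Nat → Bool} {v : Nat}
    (h : g v = false) : (l.erase v).filter g = l.filter g := by
  induction l with
  | nil => simp
  | cons x r ih =>
    by_cases hxv : x = v
    · subst hxv; simp [List.erase_cons_head, h]
    · rw [List.erase_cons_tail (by simp [hxv])]
      by_cases hx : g x <;> simp [hx, ih]

theorem filter_and_ne {l : List Nat} {g : Nat → Bool} {v : Nat} (hl : l.Nodup) :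
    l.filter (fun x => g x && !(x == v)) = (l.filter g).erase v := by
  induction l with
  | nil => simp
  | cons x r ih =>
    simp at hl
    obtain ⟨hxr, hr⟩ := hl
    have ihr := ih hr
    by_cases hxv : x = v
    · subst hxv
      have heq : List.filter (fun y => g y && !(y == x)) r = List.filter g r := by
        apply List.filter_congr
        intro y hy
        have hne : (y == x) = false := by
          simp; intro e; exact hxr (e ▸ hy)
        simp [hne]
      by_cases hx : g x
      · simp [hx, heq, List.erase_cons_head]
      · simp [hx, heq]
        exact (List.erase_of_not_mem (by simp [List.mem_filter, hxr])).symm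
    · have hne : (x == v) = false := by simp [hxv]
      by_cases hx : g x
      · rw [List.filter_cons_of_pos (by simp [hx, hne]), List.filter_cons_of_pos hx,
            List.erase_cons_tail (by simp [hxv]), ihr]
      · simp [hx, hne, ihr]

-- selecting the pair (i, k) removes k from the unselected-after-i list
theorem unself_set2 {M sel : List Int} {i k : Nat}
    (hlen : M.length ≤ sel.length) (hik : i < k) (hk : k < M.length) :
    unself M ((sel.set i 1).set k 1) (i + 1) = (unself M sel (i + 1)).erase k := by
  unfold unself
  have h1 : ∀ x ∈ List.range' (i + 1) (M.length - (i + 1)),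
      (((sel.set i 1).set k 1).getD x 0 == 0) = ((sel.getD x 0 == 0) && !(x == k)) := by
    intro x hx
    have hxr := List.mem_range'_1.mp hx
    have hxi : x ≠ i := by omega
    rw [getD_set_eq (by simp; omega), getD_set_eq (by omega)]
    by_cases hxk : x = k
    · simp [hxk]
    · simp [hxk, hxi]
  rw [List.filter_congr h1, filter_and_ne (List.nodup_range')]

theorem mergeB_nil_right (ep : List (List Int)) : mergeB ep [] = ep := by
  cases ep <;> simp [mergeB]

theorem mergeB_cons_left {p : List Int} {A B : List (List Int)}
    (h : ∀ q ∈ B, p.getD 0 0 < q.getD 0 0) : mergeB (p :: A) B = p :: mergeB A B := by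
  cases B with
  | nil => rw [mergeB_nil_right, mergeB_nil_right]
  | cons q Bt => rw [mergeB, if_pos (h q List.mem_cons_self)]

theorem mergeB_cons_right {p : List Int} {A B : List (List Int)}
    (h : ∀ q ∈ A, ¬(q.getD 0 0 < p.getD 0 0)) : mergeB A (p :: B) = p :: mergeB A B := by
  cases A with
  | nil => rw [mergeB, mergeB]
  | cons q At => rw [mergeB, if_neg (h q List.mem_cons_self)]

theorem pairUpN_mem : ∀ (L : List Nat) (q : List Int), q ∈ pairUpN L →
    ∃ (x y : Nat), q = [(x : Int), (y : Int)] ∧ x ∈ L ∧ y ∈ L := by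
  intro L
  induction L using pairUpN.induct with
  | case1 x y r ih =>
    intro q hq
    rw [pairUpN] at hq
    rcases List.mem_cons.mp hq with h | h
    · exact ⟨x, y, h, by simp, by simp⟩
    · obtain ⟨a, b, rfl, ha, hb⟩ := ih q h
      exact ⟨a, b, rfl, by simp [ha], by simp [hb]⟩
  | case2 t ht =>
    intro q hq
    match t, ht with
    | [], _ => simp [pairUpN] at hq
    | [x], _ => simp [pairUpN] at hq
    | x :: y :: r, ht => exact absurd rfl (fun e => ht x y r e)

-- the greedy on a sorted unselected list is the merge of the two consecutively-paired parity classes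
theorem RG_eq_merge (M : List Int) :
    ∀ (U : List Nat), U.Pairwise (· < ·) →
      (∀ x ∈ U, M.getD x 0 = 0 ∨ M.getD x 0 = 1) →
      RG M U = mergeB (pairUpN (U.filter (fun x => M.getD x 0 == 0)))
                      (pairUpN (U.filter (fun x => M.getD x 0 == 1))) := by
  suffices H : ∀ (n : Nat) (U : List Nat), U.length ≤ n → U.Pairwise (· < ·) →
      (∀ x ∈ U, M.getD x 0 = 0 ∨ M.getD x 0 = 1) →
      RG M U = mergeB (pairUpN (U.filter (fun x => M.getD x 0 == 0)))
                      (pairUpN (U.filter (fun x => M.getD x 0 == 1))) by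
    exact fun U hp hpar => H U.length U le_rfl hp hpar
  intro n
  induction n with
  | zero =>
    intro U hlen _ _
    have hU : U = [] := List.eq_nil_of_length_eq_zero (by omega)
    subst hU
    simp [RG, pairUpN, mergeB]
  | succ n ihn =>
    intro U hlen hsort hpar
    match U with
    | [] => simp [RG, pairUpN, mergeB]
    | u :: rest =>
      have hu := List.pairwise_cons.mp hsort
      obtain ⟨hult, hsrest⟩ := hu
      have hparrest : ∀ x ∈ rest, M.getD x 0 = 0 ∨ M.getD x 0 = 1 :=
        fun x hx => hpar x (List.mem_cons_of_mem _ hx)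
      have hlenrest : rest.length ≤ n := by simp at hlen; omega
      rcases hpar u List.mem_cons_self with hu0 | hu1
      · -- u is even
        rw [List.filter_cons_of_pos (by simp only [beq_iff_eq, hu0]),
            List.filter_cons_of_neg (by simp only [beq_iff_eq, hu0]; decide)]
        rw [RG]
        split
        next hno =>
          rw [hu0] at hno
          have hfl : rest.filter (fun x => M.getD x 0 == 0) = [] :=
            List.head?_eq_none_iff.mp hno
          rw [hfl, ihn rest hlenrest hsrest hparrest, hfl]
          simp [pairUpN, mergeB]
        next v hsome =>
          rw [hu0] at hsome
          have hvf : v ∈ rest.filter (fun x => M.getD x 0 == 0) :=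
            List.mem_of_mem_head? (by rw [hsome]; rfl)
          have hvrest : v ∈ rest := List.mem_of_mem_filter hvf
          have hv0 : M.getD v 0 = 0 := by simpa using (List.mem_filter.mp hvf).2
          cases hfl : rest.filter (fun x => M.getD x 0 == 0) with
          | nil => rw [hfl] at hsome; simp at hsome
          | cons v' t =>
            rw [hfl] at hsome
            rw [List.head?_cons, Option.some.injEq] at hsome
            rw [hsome] at hfl
            rw [hsome]
            have her : (rest.erase v).length ≤ n :=
              le_trans List.length_erase_le hlenrest
            have hes : (rest.erase v).Pairwise (· < ·) :=
              hsrest.sublist List.erase_sublist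
            have hep : ∀ x ∈ rest.erase v, M.getD x 0 = 0 ∨ M.getD x 0 = 1 :=
              fun x hx => hparrest x (List.mem_of_mem_erase hx)
            rw [ihn (rest.erase v) her hes hep,
                filter_erase_head hfl,
                filter_erase_not (by simp only [hv0]; decide)]
            rw [show pairUpN (u :: v :: t) = [(u : Int), (v : Int)] :: pairUpN t from rfl]
            rw [mergeB_cons_left]
            intro q hq
            obtain ⟨x, y, rfl, hx, _⟩ := pairUpN_mem _ q hq
            have hxr : x ∈ rest := List.mem_of_mem_filter hx
            have := hult x hxr
            simp only [List.getD]
            simp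
            exact_mod_cast this
      · -- u is odd
        rw [List.filter_cons_of_neg (by simp only [beq_iff_eq, hu1]; decide),
            List.filter_cons_of_pos (by simp only [beq_iff_eq, hu1])]
        rw [RG]
        split
        next hno =>
          rw [hu1] at hno
          have hfl : rest.filter (fun x => M.getD x 0 == 1) = [] :=
            List.head?_eq_none_iff.mp hno
          rw [hfl, ihn rest hlenrest hsrest hparrest, hfl]
          simp [pairUpN, mergeB_nil_right]
        next v hsome =>
          rw [hu1] at hsome
          have hvf : v ∈ rest.filter (fun x => M.getD x 0 == 1) :=
            List.mem_of_mem_head? (by rw [hsome]; rfl)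
          have hvrest : v ∈ rest := List.mem_of_mem_filter hvf
          have hv1 : M.getD v 0 = 1 := by simpa using (List.mem_filter.mp hvf).2
          cases hfl : rest.filter (fun x => M.getD x 0 == 1) with
          | nil => rw [hfl] at hsome; simp at hsome
          | cons v' t =>
            rw [hfl] at hsome
            rw [List.head?_cons, Option.some.injEq] at hsome
            rw [hsome] at hfl
            rw [hsome]
            have her : (rest.erase v).length ≤ n :=
              le_trans List.length_erase_le hlenrest
            have hes : (rest.erase v).Pairwise (· < ·) :=
              hsrest.sublist List.erase_sublist
            have hep : ∀ x ∈ rest.erase v, M.getD x 0 = 0 ∨ M.getD x 0 = 1 :=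
              fun x hx => hparrest x (List.mem_of_mem_erase hx)
            rw [ihn (rest.erase v) her hes hep,
                filter_erase_head hfl,
                filter_erase_not (by simp only [hv1]; decide)]
            rw [show pairUpN (u :: v :: t) = [(u : Int), (v : Int)] :: pairUpN t from rfl]
            rw [mergeB_cons_right]
            intro q hq
            obtain ⟨x, y, rfl, hx, _⟩ := pairUpN_mem _ q hq
            have hxr : x ∈ rest := List.mem_of_mem_filter hx
            have := hult x hxr
            simp only [List.getD]
            simp
            exact_mod_cast Nat.le_of_lt this

-- the outer loop, run with enough fuel and enough available pairs, appends the next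
-- (l - len(pairs)) greedy pairs
theorem aLoop_eq (M : List Int) (l : Int) :
    ∀ (rem i : Nat) (sel : List Int) (pairs : List (List Int)),
      M.length ≤ i + rem → M.length ≤ sel.length →
      (∀ x, sel.getD x 0 = 0 ∨ sel.getD x 0 = 1) →
      (pairs.length : Int) < l →
      (l - (pairs.length : Int)).toNat ≤ (RG M (unself M sel i)).length →
      aLoop M l rem i sel pairs
        = pairs ++ (RG M (unself M sel i)).take (l - pairs.length).toNat := by
  intro rem
  induction rem with
  | zero =>
    intro i sel pairs hi hlen hsel hc hav
    have hU : unself M sel i = [] := by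
      unfold unself
      rw [Nat.sub_eq_zero_of_le (by omega)]
      simp
    rw [hU] at hav
    simp only [RG, List.length_nil] at hav
    exact absurd hav (by omega)
  | succ rem ih =>
    intro i sel pairs hi hlen hsel hc hav
    rcases Nat.lt_or_ge i M.length with hi' | hge
    swap
    · have hU : unself M sel i = [] := by
        unfold unself
        rw [Nat.sub_eq_zero_of_le (by omega)]
        simp
      rw [hU] at hav
      simp only [RG, List.length_nil] at hav
      exact absurd hav (by omega)
    rw [aLoop]
    rcases hsel i with h0 | h1
    · -- i is unselected
      rw [if_neg (by rw [h0]; decide)]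
      have hfind := findJA_eq_head M sel (M.getD i 0) (M.length - (i + 1)) (i + 1) (by omega)
      have hav2 : (l - (pairs.length : Int)).toNat
          ≤ (RG M (i :: unself M sel (i + 1))).length := by
        rwa [unself_cons M sel hi' h0] at hav
      rw [unself_cons M sel hi' h0, RG, hfind]
      cases hh : ((unself M sel (i + 1)).filter (fun x => M.getD x 0 == M.getD i 0)).head? with
      | none =>
        have erg : RG M (i :: unself M sel (i + 1)) = RG M (unself M sel (i + 1)) := by
          rw [RG]
          split
          · rfl
          · next v hv => rw [hv] at hh; cases hh
        simp only
        rw [if_neg (by simp only [beq_iff_eq]; omega)]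
        exact ih (i + 1) sel pairs (by omega) hlen hsel hc (erg ▸ hav2)
      | some k =>
        have erg : RG M (i :: unself M sel (i + 1))
            = [(i : Int), (k : Int)] :: RG M ((unself M sel (i + 1)).erase k) := by
          rw [RG]
          split
          · next hv => rw [hv] at hh; cases hh
          · next v hv => rw [hv] at hh; cases hh; rfl
        simp only
        have hkmem : k ∈ (unself M sel (i + 1)).filter (fun x => M.getD x 0 == M.getD i 0) :=
          List.mem_of_mem_head? (by rw [hh]; rfl)
        have hkun : k ∈ unself M sel (i + 1) := (List.mem_filter.mp hkmem).1
        have hkr : i + 1 ≤ k ∧ k < M.length := by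
          have := List.mem_range'_1.mp (List.mem_of_mem_filter hkun)
          omega
        have hksel : sel.getD k 0 = 0 := by
          have := (List.mem_filter.mp hkun).2
          simpa using this
        have hlen2 : M.length ≤ ((sel.set i 1).set k 1).length := by simpa using hlen
        have hsel2 : ∀ x, ((sel.set i 1).set k 1).getD x 0 = 0 ∨ ((sel.set i 1).set k 1).getD x 0 = 1 := by
          intro x
          rw [getD_set_eq (by simp; omega), getD_set_eq (by omega)]
          split_ifs with hxk hxi
          · simp
          · simp
          · exact hsel x
        have hU : unself M ((sel.set i 1).set k 1) (i + 1) = (unself M sel (i + 1)).erase k :=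
          unself_set2 hlen (by omega) (by omega)
        by_cases hbreak : ((pairs.length : Int) + 1 = l)
        · rw [if_pos (by simp only [List.length_append, List.length_cons, List.length_nil,
            Nat.cast_add, Nat.cast_one, beq_iff_eq]; push_cast; omega)]
          have h1 : (l - (pairs.length : Int)).toNat = 1 := by omega
          rw [h1, List.take_succ_cons, List.take_zero]
        · rw [if_neg (by simp only [List.length_append, List.length_cons, List.length_nil,
            Nat.cast_add, Nat.cast_one, beq_iff_eq]; push_cast; omega)]
          have hav3 : (l - (((pairs ++ [[(i : Int), (k : Int)]]).length : Nat) : Int)).toNat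
              ≤ (RG M (unself M ((sel.set i 1).set k 1) (i + 1))).length := by
            rw [hU]
            rw [erg] at hav2
            simp only [List.length_cons] at hav2
            simp only [List.length_append, List.length_cons, List.length_nil]
            omega
          rw [ih (i + 1) ((sel.set i 1).set k 1) (pairs ++ [[(i : Int), (k : Int)]])
            (by omega) hlen2 hsel2
            (by simp only [List.length_append, List.length_cons, List.length_nil]; push_cast; omega)
            hav3]
          rw [hU]
          have h2 : (l - (pairs.length : Int)).toNat
              = (l - ((pairs ++ [[(i : Int), (k : Int)]]).length : Int)).toNat + 1 := by
            simp only [List.length_append, List.length_cons, List.length_nil]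
            push_cast; omega
          rw [h2, List.take_succ_cons, List.append_assoc]
          rfl
    · -- i already selected
      rw [if_pos (by rw [h1]; decide)]
      have he := unself_succ M sel (show sel.getD i 0 ≠ 0 by rw [h1]; decide)
      rw [he]
      exact ih (i + 1) sel pairs (by omega) hlen hsel hc (he ▸ hav)


theorem enumerate_filter_map (f : Int → Bool) :
    ∀ (a : List Int) (s : Nat),
      ((PySem.List.enumerate a (s : Int)).filter (fun p => f p.2)).map (fun p => p.1)
        = ((List.range a.length).filter (fun j => f (a.getD j 0))).map
            (fun j => ((s + j : Nat) : Int)) := by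
  intro a
  induction a with
  | nil => intro s; simp [PySem.List.enumerate_nil]
  | cons x r ih =>
    intro s
    rw [PySem.List.enumerate_cons]
    have hcast : ((s : Int) + 1) = (((s + 1 : Nat)) : Int) := by push_cast; ring
    rw [List.length_cons, List.range_succ_eq_map]
    by_cases hx : f x
    · rw [List.filter_cons_of_pos (by simpa using hx), List.filter_cons_of_pos (by simpa using hx)]
      rw [List.map_cons, List.map_cons, hcast, ih (s + 1)]
      simp only [List.filter_map, List.map_map, Function.comp_def, List.getD_cons_succ]
      congr 1
      apply List.map_congr_left
      intro j _
      push_cast; ring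
    · rw [List.filter_cons_of_neg (by simpa using hx), List.filter_cons_of_neg (by simpa using hx)]
      rw [hcast, ih (s + 1)]
      simp only [List.filter_map, List.map_map, Function.comp_def, List.getD_cons_succ]
      apply List.map_congr_left
      intro j _
      push_cast; ring

theorem pairUpB_map_cast : ∀ (l : List Nat),
    pairUpB (l.map (fun x => ((x : Nat) : Int))) = pairUpN l := by
  intro l
  induction l using pairUpN.induct with
  | case1 x y r ih => simp only [List.map_cons, pairUpB, pairUpN, ih]
  | case2 l h =>
    match l, h with
    | [], _ => rfl
    | [x], _ => rfl
    | x :: y :: r, h => exact absurd rfl (fun e => h x y r e)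

theorem replicate_getD (k x : Nat) : (List.replicate k (0 : Int)).getD x 0 = 0 := by
  rw [List.getD_eq_getElem?_getD, List.getElem?_replicate]
  split <;> rfl

theorem unself_replicate (M : List Int) (k : Nat) :
    unself M (List.replicate k 0) 0 = List.range M.length := by
  unfold unself
  rw [Nat.sub_zero, ← List.range_eq_range']
  apply List.filter_eq_self.mpr
  intro x _
  simp [replicate_getD]

theorem getD_map_mod (a : List Int) {x : Nat} (h : x < a.length) :
    (a.map (fun v => PySem.Int.mod v 2)).getD x 0 = PySem.Int.mod (a.getD x 0) 2 := by
  rw [List.getD_eq_getElem?_getD, List.getElem?_map, List.getD_eq_getElem?_getD,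
      List.getElem?_eq_getElem h]
  rfl

-- helper lengths
theorem length_pairUpN : ∀ L : List Nat, (pairUpN L).length = L.length / 2 := by
  intro L
  induction L using pairUpN.induct with
  | case1 x y r ih =>
    simp only [pairUpN, List.length_cons, ih]
    omega
  | case2 t ht =>
    match t, ht with
    | [], _ => simp [pairUpN]
    | [x], _ => simp [pairUpN]
    | x :: y :: r, ht => exact absurd rfl (fun e => ht x y r e)

theorem length_mergeB : ∀ A B : List (List Int), (mergeB A B).length = A.length + B.length := by
  intro A B
  induction A, B using mergeB.induct with
  | case1 op => simp [mergeB]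
  | case2 ep h => rw [mergeB_nil_right]; simp
  | case3 e et o ot hlt ih =>
    rw [mergeB, if_pos hlt]
    simp only [List.length_cons, ih]
    omega
  | case4 e et o ot hlt ih =>
    rw [mergeB, if_neg hlt]
    simp only [List.length_cons, ih]
    omega

theorem enum_filter_count (f : Int → Bool) :
    ∀ (a : List Int) (s : Int),
      ((PySem.List.enumerate a s).filter (fun p => f p.2)).length = a.countP f := by
  intro a
  induction a with
  | nil => intro s; simp [PySem.List.enumerate_nil]
  | cons x r ih =>
    intro s
    rw [PySem.List.enumerate_cons]
    by_cases hx : f x <;> simp [hx, List.countP_cons, ih]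

theorem counts_mod_total : ∀ a : List Int,
    a.countP (fun v => PySem.Int.mod v 2 == 0)
      + a.countP (fun v => PySem.Int.mod v 2 == 1) = a.length := by
  intro a
  induction a with
  | nil => rfl
  | cons x r ih =>
    have h1 := PySem.Int.mod_nonneg x (b := 2) (by decide)
    have h2 := PySem.Int.mod_lt x (b := 2) (by decide)
    have hx : PySem.Int.mod x 2 = 0 ∨ PySem.Int.mod x 2 = 1 := by omega
    rcases hx with h | h
    · simp only [List.countP_cons, List.length_cons, h,
        show ((0 : Int) == 0) = true from rfl, show ((0 : Int) == 1) = false from rfl,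
        show (if True then (1 : Nat) else 0) = 1 from if_pos trivial,
        show (if (false = true) then (1 : Nat) else 0) = 0 from rfl]
      omega
    · simp only [List.countP_cons, List.length_cons, h,
        show ((1 : Int) == 0) = false from rfl, show ((1 : Int) == 1) = true from rfl,
        show (if True then (1 : Nat) else 0) = 1 from if_pos trivial,
        show (if (false = true) then (1 : Nat) else 0) = 0 from rfl]
      omega

theorem replicate_getD01 (m x : Nat) :
    (List.replicate m (0 : Int)).getD x 0 = 0 ∨ (List.replicate m (0 : Int)).getD x 0 = 1 :=
  Or.inl (replicate_getD m x)

-- B's whole result is the greedy list RG over all indices, truncated to n-1 pairs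
theorem solve_alt_eq_RG (n : Int) (a : List Int) :
    solve_alt n a
      = (RG (a.map (fun x => PySem.Int.mod x 2))
          (List.range (a.map (fun x => PySem.Int.mod x 2)).length)).take (n - 1).toNat := by
  have hMlen : (a.map (fun x => PySem.Int.mod x 2)).length = a.length := by simp
  set M := a.map (fun x => PySem.Int.mod x 2) with hM
  have hpar : ∀ x ∈ List.range M.length, M.getD x 0 = 0 ∨ M.getD x 0 = 1 := by
    intro x hx
    have hxm : x < a.length := by simpa [hMlen] using List.mem_range.mp hx
    rw [hM, getD_map_mod a hxm]
    have h1 := PySem.Int.mod_nonneg (a.getD x 0) (b := 2) (by decide)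
    have h2 := PySem.Int.mod_lt (a.getD x 0) (b := 2) (by decide)
    omega
  have hmerge := RG_eq_merge M (List.range M.length) (List.pairwise_lt_range) hpar
  have hbridge : ∀ (c : Int) (g : Int → Bool), (∀ v : Int, g v = (PySem.Int.mod v 2 == c)) →
      ((PySem.List.enumerate a).filter (fun p => g p.2)).map (fun p => p.1)
        = ((List.range M.length).filter (fun x => M.getD x 0 == c)).map
            (fun j => ((j : Nat) : Int)) := by
    intro c g hg
    have h0 : (PySem.List.enumerate a) = PySem.List.enumerate a ((0 : Nat) : Int) := by norm_num
    rw [h0, enumerate_filter_map g a 0]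
    rw [hMlen]
    have hfc : (List.range a.length).filter (fun j => g (a.getD j 0))
        = (List.range a.length).filter (fun x => M.getD x 0 == c) := by
      apply List.filter_congr
      intro j hj
      rw [hg, hM, getD_map_mod a (List.mem_range.mp hj)]
    rw [hfc]
    simp
  have he := hbridge 0 (fun v => PySem.Int.mod v 2 == 0) (fun v => rfl)
  have ho := hbridge 1 (fun v => PySem.Int.mod v 2 == 1) (fun v => rfl)
  have halt : solve_alt n a
      = (mergeB (pairUpB (((PySem.List.enumerate a).filter
            (fun p => PySem.Int.mod p.2 2 == 0)).map (fun p => p.1)))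
          (pairUpB (((PySem.List.enumerate a).filter
            (fun p => PySem.Int.mod p.2 2 == 1)).map (fun p => p.1)))).take (n - 1).toNat := rfl
  rw [halt, he, ho, pairUpB_map_cast, pairUpB_map_cast, hmerge]

-- A = take (n-1) (merge of the consecutively-paired parity classes), whenever A's
-- break is guaranteed: n ≥ 2, len(a) ≤ 2n, and at least n-1 pairs available
theorem solve_eq_take (n : Int) (a : List Int) (hn : 2 ≤ n)
    (hm2 : (a.length : Int) ≤ 2 * n)
    (hav : n - 1 ≤ ((a.countP (fun v => PySem.Int.mod v 2 == 0) / 2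
        + a.countP (fun v => PySem.Int.mod v 2 == 1) / 2 : Nat) : Int)) :
    solve n a = solve_alt n a := by
  have hMlen : (a.map (fun x => PySem.Int.mod x 2)).length = a.length := by simp
  set M := a.map (fun x => PySem.Int.mod x 2) with hM
  have hsolve : solve n a
      = aLoop M (n - 1) (2 * n).toNat 0 (List.replicate (2 * n).toNat 0) [] := rfl
  have hpar : ∀ x ∈ List.range M.length, M.getD x 0 = 0 ∨ M.getD x 0 = 1 := by
    intro x hx
    have hxm : x < a.length := by simpa [hMlen] using List.mem_range.mp hx
    rw [hM, getD_map_mod a hxm]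
    have h1 := PySem.Int.mod_nonneg (a.getD x 0) (b := 2) (by decide)
    have h2 := PySem.Int.mod_lt (a.getD x 0) (b := 2) (by decide)
    omega
  have hmerge := RG_eq_merge M (List.range M.length) (List.pairwise_lt_range) hpar
  have hbridge : ∀ (c : Int) (g : Int → Bool), (∀ v : Int, g v = (PySem.Int.mod v 2 == c)) →
      ((PySem.List.enumerate a).filter (fun p => g p.2)).map (fun p => p.1)
        = ((List.range M.length).filter (fun x => M.getD x 0 == c)).map
            (fun j => ((j : Nat) : Int)) := by
    intro c g hg
    have h0 : (PySem.List.enumerate a) = PySem.List.enumerate a ((0 : Nat) : Int) := by norm_num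
    rw [h0, enumerate_filter_map g a 0]
    rw [hMlen]
    have hfc : (List.range a.length).filter (fun j => g (a.getD j 0))
        = (List.range a.length).filter (fun x => M.getD x 0 == c) := by
      apply List.filter_congr
      intro j hj
      rw [hg, hM, getD_map_mod a (List.mem_range.mp hj)]
    rw [hfc]
    simp
  have he := hbridge 0 (fun v => PySem.Int.mod v 2 == 0) (fun v => rfl)
  have ho := hbridge 1 (fun v => PySem.Int.mod v 2 == 1) (fun v => rfl)
  have hlen0 : ((List.range M.length).filter (fun x => M.getD x 0 == 0)).length
      = a.countP (fun v => PySem.Int.mod v 2 == 0) := by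
    have h1 := congrArg List.length he
    simp only [List.length_map] at h1
    rw [← h1]
    have h0 : (PySem.List.enumerate a) = PySem.List.enumerate a ((0 : Nat) : Int) := by norm_num
    rw [h0]
    exact enum_filter_count (fun v => PySem.Int.mod v 2 == 0) a ((0 : Nat) : Int)
  have hlen1 : ((List.range M.length).filter (fun x => M.getD x 0 == 1)).length
      = a.countP (fun v => PySem.Int.mod v 2 == 1) := by
    have h1 := congrArg List.length ho
    simp only [List.length_map] at h1
    rw [← h1]
    have h0 : (PySem.List.enumerate a) = PySem.List.enumerate a ((0 : Nat) : Int) := by norm_num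
    rw [h0]
    exact enum_filter_count (fun v => PySem.Int.mod v 2 == 1) a ((0 : Nat) : Int)
  have hRGlen : (RG M (List.range M.length)).length
      = a.countP (fun v => PySem.Int.mod v 2 == 0) / 2
        + a.countP (fun v => PySem.Int.mod v 2 == 1) / 2 := by
    rw [hmerge, length_mergeB, length_pairUpN, length_pairUpN, hlen0, hlen1]
  have hmain := aLoop_eq M (n - 1) (2 * n).toNat 0 (List.replicate (2 * n).toNat 0) []
    (by rw [hMlen]; omega) (by simp [hMlen]; omega)
    (replicate_getD01 (2 * n).toNat)
    (by simp only [List.length_nil, Nat.cast_zero]; omega)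
    (by rw [unself_replicate M, hRGlen]; simp only [List.length_nil, Nat.cast_zero, Int.sub_zero]; omega)
  rw [unself_replicate M] at hmain
  rw [hsolve, hmain, solve_alt_eq_RG, ← hM]
  simp only [List.nil_append, List.length_nil, Nat.cast_zero, Int.sub_zero]

-- n ≤ 0: A's loop body never runs; B takes max(n-1,0) = 0 pairs
theorem solve_nonpos (n : Int) (a : List Int) (hn : n ≤ 0) : solve n a = solve_alt n a := by
  have h2 : (2 * n).toNat = 0 := by omega
  have h1 : (n - 1).toNat = 0 := by omega
  have hs : solve n a = aLoop (a.map (fun x => PySem.Int.mod x 2)) (n - 1) (2 * n).toNat 0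
      (List.replicate (2 * n).toNat 0) [] := rfl
  have ha : solve_alt n a
      = (mergeB (pairUpB (((PySem.List.enumerate a).filter
            (fun p => PySem.Int.mod p.2 2 == 0)).map (fun p => p.1)))
          (pairUpB (((PySem.List.enumerate a).filter
            (fun p => PySem.Int.mod p.2 2 == 1)).map (fun p => p.1)))).take (n - 1).toNat := rfl
  rw [hs, ha, h2, h1]
  simp [aLoop]

-- for n = 1, B always returns []: it takes max(0, 0) pairs
theorem solve_alt_one (a : List Int) : solve_alt 1 a = [] := by
  have ha : solve_alt 1 a
      = (mergeB (pairUpB (((PySem.List.enumerate a).filter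
            (fun p => PySem.Int.mod p.2 2 == 0)).map (fun p => p.1)))
          (pairUpB (((PySem.List.enumerate a).filter
            (fun p => PySem.Int.mod p.2 2 == 1)).map (fun p => p.1)))).take ((1 : Int) - 1).toNat := rfl
  rw [ha]
  simp

-- n = 1 on a one-element list: the single scan finds nothing and the break fires at once
theorem solve_one_single (x : Int) : solve 1 [x] = [] := rfl

-- n = 1, first two elements of different parity, len = 2: no match, break, []
theorem solve_one_diff (x y : Int) (h : ¬ PySem.Int.mod (x + y) 2 = 0) :
    solve 1 [x, y] = [] := by
  have hmx : PySem.Int.mod x 2 = x % 2 := PySem.Int.mod_eq_emod_of_pos (by decide)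
  have hmy : PySem.Int.mod y 2 = y % 2 := PySem.Int.mod_eq_emod_of_pos (by decide)
  have hodd : ¬ (x + y) % 2 = 0 := by
    rwa [PySem.Int.mod_eq_emod_of_pos (by decide)] at h
  have hx2 : x % 2 = 0 ∨ x % 2 = 1 := by omega
  have hy2 : y % 2 = 0 ∨ y % 2 = 1 := by omega
  rcases hx2 with hx | hx <;> rcases hy2 with hy | hy
  · exact absurd (by omega) hodd
  · simp [solve, aLoop, findJA, hmx, hmy, hx, hy]
  · simp [solve, aLoop, findJA, hmx, hmy, hx, hy]
  · exact absurd (by omega) hodd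

-- n = 1, first two elements of equal parity: A pairs (0,1) and, with l = 0 already
-- passed, returns that single pair whatever follows
theorem solve_one_same (x y : Int) (rest : List Int) (h : PySem.Int.mod (x + y) 2 = 0) :
    solve 1 (x :: y :: rest) = [[0, 1]] := by
  have hmx : PySem.Int.mod x 2 = x % 2 := PySem.Int.mod_eq_emod_of_pos (by decide)
  have hmy : PySem.Int.mod y 2 = y % 2 := PySem.Int.mod_eq_emod_of_pos (by decide)
  have hsum : (x + y) % 2 = 0 := by
    rwa [PySem.Int.mod_eq_emod_of_pos (by decide)] at h
  have hx2 : x % 2 = 0 ∨ x % 2 = 1 := by omega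
  rcases hx2 with hx | hx
  · have hy : y % 2 = 0 := by omega
    simp [solve, aLoop, findJA, hmx, hmy, hx, hy]
  · have hy : y % 2 = 1 := by omega
    simp [solve, aLoop, findJA, hmx, hmy, hx, hy]

theorem RG_cons_some {M : List Int} {u v : Nat} {rest : List Nat}
    (h : (rest.filter (fun x => M.getD x 0 == M.getD u 0)).head? = some v) :
    RG M (u :: rest) = [(u : Int), (v : Int)] :: RG M (rest.erase v) := by
  rw [RG]
  split
  · next hv => rw [hv] at h; cases h
  · next w hw => rw [hw] at h; cases h; rfl

theorem head_filter1 {g : Nat → Bool} {L : List Nat} (h1 : g 1 = true) :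
    ((1 :: L).filter g).head? = some 1 := by
  rw [List.filter_cons_of_pos h1, List.head?_cons]

theorem head_filter2 {g : Nat → Bool} {L : List Nat} (h1 : g 1 = false) (h2 : g 2 = true) :
    ((1 :: 2 :: L).filter g).head? = some 2 := by
  rw [List.filter_cons_of_neg (by simp [h1]), List.filter_cons_of_pos h2, List.head?_cons]

theorem head_filter3 {g : Nat → Bool} {L : List Nat} (h1 : g 1 = false) (h2 : g 2 = false)
    (h3 : g 3 = true) : ((1 :: 2 :: 3 :: L).filter g).head? = some 3 := by
  rw [List.filter_cons_of_neg (by simp [h1]), List.filter_cons_of_neg (by simp [h2]),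
      List.filter_cons_of_pos h3, List.head?_cons]

-- n = 2 on a list longer than 4 whose first element finds a same-parity partner in the
-- scanned window: A forms that one pair and breaks at once
theorem solve_two_long (x0 x1 x2 x3 x4 : Int) (rest : List Int)
    (hmatch : PySem.Int.mod (x0 + x1) 2 = 0 ∨ PySem.Int.mod (x0 + x2) 2 = 0 ∨
      PySem.Int.mod (x0 + x3) 2 = 0) :
    solve 2 (x0 :: x1 :: x2 :: x3 :: x4 :: rest)
      = solve_alt 2 (x0 :: x1 :: x2 :: x3 :: x4 :: rest) := by
  have hm0 : PySem.Int.mod x0 2 = x0 % 2 := PySem.Int.mod_eq_emod_of_pos (by decide)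
  have hm1 : PySem.Int.mod x1 2 = x1 % 2 := PySem.Int.mod_eq_emod_of_pos (by decide)
  have hm2 : PySem.Int.mod x2 2 = x2 % 2 := PySem.Int.mod_eq_emod_of_pos (by decide)
  have hm3 : PySem.Int.mod x3 2 = x3 % 2 := PySem.Int.mod_eq_emod_of_pos (by decide)
  have hmm : ∀ u v : Int, PySem.Int.mod (u + v) 2 = (u + v) % 2 :=
    fun u v => PySem.Int.mod_eq_emod_of_pos (by decide)
  rw [hmm, hmm, hmm] at hmatch
  rw [solve_alt_eq_RG]
  have hrange : List.range ((x0 :: x1 :: x2 :: x3 :: x4 :: rest).map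
      (fun x => PySem.Int.mod x 2)).length
      = 0 :: 1 :: 2 :: 3 :: List.range' 4 (rest.length + 1) := by
    simp only [List.length_map, List.length_cons]
    rw [List.range_eq_range', List.range'_succ, List.range'_succ, List.range'_succ,
        List.range'_succ]
  rw [hrange]
  by_cases p1 : (x0 + x1) % 2 = 0
  · have b1 : ((((x0 :: x1 :: x2 :: x3 :: x4 :: rest).map (fun x => PySem.Int.mod x 2)).getD 1 0
        == ((x0 :: x1 :: x2 :: x3 :: x4 :: rest).map (fun x => PySem.Int.mod x 2)).getD 0 0)
        = true) := by
      simp only [List.map_cons, List.getD_cons_zero, List.getD_cons_succ, hm0, hm1,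
        beq_iff_eq]
      omega
    rw [RG_cons_some (v := 1) (head_filter1 b1)]
    simp [solve, aLoop, findJA, hm0, hm1, show x1 % 2 = x0 % 2 by omega]
  · have b1 : ((((x0 :: x1 :: x2 :: x3 :: x4 :: rest).map (fun x => PySem.Int.mod x 2)).getD 1 0
        == ((x0 :: x1 :: x2 :: x3 :: x4 :: rest).map (fun x => PySem.Int.mod x 2)).getD 0 0)
        = false) := by
      simp only [List.map_cons, List.getD_cons_zero, List.getD_cons_succ, hm0, hm1,
        beq_eq_false_iff_ne, ne_eq]
      omega
    by_cases p2 : (x0 + x2) % 2 = 0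
    · have b2 : ((((x0 :: x1 :: x2 :: x3 :: x4 :: rest).map (fun x => PySem.Int.mod x 2)).getD 2 0
          == ((x0 :: x1 :: x2 :: x3 :: x4 :: rest).map (fun x => PySem.Int.mod x 2)).getD 0 0)
          = true) := by
        simp only [List.map_cons, List.getD_cons_zero, List.getD_cons_succ, hm0, hm2,
          beq_iff_eq]
        omega
      rw [RG_cons_some (v := 2) (head_filter2 b1 b2)]
      simp [solve, aLoop, findJA, hm0, hm1, hm2,
        show ¬ x1 % 2 = x0 % 2 by omega, show x2 % 2 = x0 % 2 by omega]
    · have p3 : (x0 + x3) % 2 = 0 := by tauto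
      have b2 : ((((x0 :: x1 :: x2 :: x3 :: x4 :: rest).map (fun x => PySem.Int.mod x 2)).getD 2 0
          == ((x0 :: x1 :: x2 :: x3 :: x4 :: rest).map (fun x => PySem.Int.mod x 2)).getD 0 0)
          = false) := by
        simp only [List.map_cons, List.getD_cons_zero, List.getD_cons_succ, hm0, hm2,
          beq_eq_false_iff_ne, ne_eq]
        omega
      have b3 : ((((x0 :: x1 :: x2 :: x3 :: x4 :: rest).map (fun x => PySem.Int.mod x 2)).getD 3 0
          == ((x0 :: x1 :: x2 :: x3 :: x4 :: rest).map (fun x => PySem.Int.mod x 2)).getD 0 0)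
          = true) := by
        simp only [List.map_cons, List.getD_cons_zero, List.getD_cons_succ, hm0, hm3,
          beq_iff_eq]
        omega
      rw [RG_cons_some (v := 3) (head_filter3 b1 b2 b3)]
      simp [solve, aLoop, findJA, hm0, hm1, hm2, hm3,
        show ¬ x1 % 2 = x0 % 2 by omega, show ¬ x2 % 2 = x0 % 2 by omega,
        show x3 % 2 = x0 % 2 by omega]

-- ===== VERDICT (by name: the statement is the Claim_ definition above) =====
theorem solve_spec : Claim_unchanged_solve := by
  intro n a _ hpre
  unfold Spec_solve
  intro hnD
  unfold Pre_solve at hpre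
  unfold D_solve at hnD
  rcases hpre with hn0 | hpre | ⟨hn1, hm1, hmlt, hcnt⟩ | ⟨hn1, hm2, hsame⟩ | ⟨hn2, hm4, hmatch⟩
  · exact solve_nonpos n a hn0
  · -- len(a) = 2n
    by_cases hn0 : n ≤ 0
    · exact solve_nonpos n a hn0
    by_cases hn1 : n = 1
    · subst hn1
      have hlen : a.length = 2 := by omega
      match a, hlen with
      | [x, y], _ =>
        have hd : ¬ PySem.Int.mod (x + y) 2 = 0 := by
          intro hsum
          exact hnD ⟨rfl, by simp, by simpa using hsum⟩
        rw [solve_one_diff x y hd, solve_alt_one]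
    · refine solve_eq_take n a (by omega) (by omega) ?_
      have := counts_mod_total a
      omega
  · -- short list with exactly n-1 available pairs
    by_cases hn1 : n = 1
    · subst hn1
      have hlen : a.length = 1 := by omega
      match a, hlen with
      | [x], _ => rw [solve_one_single, solve_alt_one]
    · exact solve_eq_take n a (by omega) (by omega) (by omega)
  · -- this disjunct is exactly the D_ region, excluded by ¬D
    exact absurd ⟨hn1, hm2, hsame⟩ hnD
  · -- n = 2 on a longer list with an early same-parity partner for a[0]
    subst hn2
    have hlen : 5 ≤ a.length := by omega
    match a, hlen with
    | x0 :: x1 :: x2 :: x3 :: x4 :: rest, _ =>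
      exact solve_two_long x0 x1 x2 x3 x4 rest hmatch

theorem solve_changed : Claim_changed_solve := by unfold Claim_changed_solve; decide

theorem solve_tight : Claim_exact_solve := by
  intro n a _ _ hD
  obtain ⟨hn1, hlen2, hsum⟩ := hD
  subst hn1
  match a, hlen2 with
  | x :: y :: rest, _ =>
    have hs : PySem.Int.mod (x + y) 2 = 0 := by simpa using hsum
    rw [solve_one_same x y rest hs, solve_alt_one]
    simp
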